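-- pv_equiv track=rewrite | github.com/pranavmacha/HackXtreme | Radio/generate_eco_dataset.py | pick_analysis_key
-- ===== SOURCE A (Python) =====
-- def pick_analysis_key(headline: str) -> str:
--     hl = headline.lower()
--     if any(k in hl for k in ["stock", "market", "volatility", "vix", "crash", "correction", "liquidation", "fund"]):
--         return "markets"
--     if any(k in hl for k in ["debt", "sovereign", "default", "rating", "liquidity", "bank", "imf", "reserves"]):
--         return "sovereign"
--     if any(k in hl for k in ["price", "wheat", "oil", "commodity", "gas", "futures", "harvest", "inventory"]):
--         return "commodities"
--     if any(k in hl for k in ["trade", "shipping", "supply", "port", "tariffs", "logistic", "transit"]):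
--         return "trade"
--     return "general"
-- ===== SOURCE B (Python) =====
-- # Single left-to-right sweep over the text: at each position, record which
-- # categories have a keyword starting there; pick the highest-priority flag at
-- # the end (no per-category substring re-scans, no early returns mid-scan).
-- _MARKETS = ("stock", "market", "volatility", "vix", "crash", "correction", "liquidation", "fund")
-- _SOVEREIGN = ("debt", "sovereign", "default", "rating", "liquidity", "bank", "imf", "reserves")
-- _COMMODITIES = ("price", "wheat", "oil", "commodity", "gas", "futures", "harvest", "inventory")
-- _TRADE = ("trade", "shipping", "supply", "port", "tariffs", "logistic", "transit")
--
-- def pick_analysis_key(headline: str) -> str: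
--     hl = headline.lower()
--     m = s = c = t = False
--     for i in range(len(hl) + 1):
--         m = m or hl.startswith(_MARKETS, i)
--         s = s or hl.startswith(_SOVEREIGN, i)
--         c = c or hl.startswith(_COMMODITIES, i)
--         t = t or hl.startswith(_TRADE, i)
--     if m:
--         return "markets"
--     if s:
--         return "sovereign"
--     if c:
--         return "commodities"
--     if t:
--         return "trade"
--     return "general"
-- ===== Notes on version B (the rewrite author's own statement) =====
-- stated objective: alternative
-- what changed: Instead of four early-return any-substring checks per category, B makes a single left-to-right sweep over the positions of the lowered headline, accumulating one boolean flag per category (keyword starts at this position), and at the end returns the highest-priority set flag.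
import Mathlib
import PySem

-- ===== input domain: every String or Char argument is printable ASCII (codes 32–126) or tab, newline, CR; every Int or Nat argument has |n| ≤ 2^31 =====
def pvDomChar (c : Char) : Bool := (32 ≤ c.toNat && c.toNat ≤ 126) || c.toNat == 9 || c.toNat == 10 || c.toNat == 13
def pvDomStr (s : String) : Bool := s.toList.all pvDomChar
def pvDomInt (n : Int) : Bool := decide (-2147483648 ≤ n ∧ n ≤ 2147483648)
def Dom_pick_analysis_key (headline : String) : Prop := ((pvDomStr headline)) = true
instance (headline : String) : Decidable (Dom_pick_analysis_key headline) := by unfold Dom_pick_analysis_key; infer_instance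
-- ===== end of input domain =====

-- B replaces A's four early-return substring checks by one left-to-right sweep over the
-- text positions that accumulates a match flag per category, then picks the
-- highest-priority flag (alternative decomposition, same asymptotic cost).


-- ===== PORT A =====
def pick_analysis_key (headline : String) : String :=
  let hl := PySem.Str.lower headline
  if (["stock", "market", "volatility", "vix", "crash", "correction", "liquidation", "fund"].any
      (fun k => PySem.Str.isIn k hl)) then "markets"
  else if (["debt", "sovereign", "default", "rating", "liquidity", "bank", "imf", "reserves"].any
      (fun k => PySem.Str.isIn k hl)) then "sovereign"
  else if (["price", "wheat", "oil", "commodity", "gas", "futures", "harvest", "inventory"].any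
      (fun k => PySem.Str.isIn k hl)) then "commodities"
  else if (["trade", "shipping", "supply", "port", "tariffs", "logistic", "transit"].any
      (fun k => PySem.Str.isIn k hl)) then "trade"
  else "general"

-- ===== PORT B =====
def pvMarkets : List String := ["stock", "market", "volatility", "vix", "crash", "correction", "liquidation", "fund"]
def pvSovereign : List String := ["debt", "sovereign", "default", "rating", "liquidity", "bank", "imf", "reserves"]
def pvCommodities : List String := ["price", "wheat", "oil", "commodity", "gas", "futures", "harvest", "inventory"]
def pvTrade : List String := ["trade", "shipping", "supply", "port", "tariffs", "logistic", "transit"]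

-- hl.startswith((kw, …), i) for 0 ≤ i ≤ len(hl): some keyword is a prefix of hl[i:]
def pvStartsAt (hl : List Char) (kws : List String) (i : Nat) : Bool :=
  kws.any (fun k => PySem.Chars.startswith (hl.drop i) k.toList)

def pick_analysis_key_alt (headline : String) : String :=
  let hl := (PySem.Str.lower headline).toList
  let st := (List.range (hl.length + 1)).foldl
    (fun (acc : Bool × Bool × Bool × Bool) i =>
      (acc.1 || pvStartsAt hl pvMarkets i,
       acc.2.1 || pvStartsAt hl pvSovereign i,
       acc.2.2.1 || pvStartsAt hl pvCommodities i,
       acc.2.2.2 || pvStartsAt hl pvTrade i))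
    (false, false, false, false)
  if st.1 then "markets"
  else if st.2.1 then "sovereign"
  else if st.2.2.1 then "commodities"
  else if st.2.2.2 then "trade"
  else "general"

-- ===== PRECONDITION & SPEC =====
def Spec_pick_analysis_key (headline : String) (out : String) : Prop := out = pick_analysis_key_alt headline
instance (headline : String) (out : String) : Decidable (Spec_pick_analysis_key headline out) := by unfold Spec_pick_analysis_key; infer_instance

-- ===== CLAIM (what is proved, stated in full; the proofs are below) =====
def Claim_equal_pick_analysis_key : Prop := ∀ (headline : String), Dom_pick_analysis_key headline → Spec_pick_analysis_key headline (pick_analysis_key headline)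

-- ===== LEMMAS AND PROOFS =====

-- the 4-flag fold computes, componentwise, 'some position matches'
theorem pv_fold_flags (hl : List Char) (l : List Nat) (a b c d : Bool) :
    l.foldl
      (fun (acc : Bool × Bool × Bool × Bool) i =>
        (acc.1 || pvStartsAt hl pvMarkets i,
         acc.2.1 || pvStartsAt hl pvSovereign i,
         acc.2.2.1 || pvStartsAt hl pvCommodities i,
         acc.2.2.2 || pvStartsAt hl pvTrade i))
      (a, b, c, d)
    = (a || l.any (pvStartsAt hl pvMarkets),
       b || l.any (pvStartsAt hl pvSovereign),
       c || l.any (pvStartsAt hl pvCommodities),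
       d || l.any (pvStartsAt hl pvTrade)) := by
  induction l generalizing a b c d with
  | nil => simp
  | cons x xs ih => simp [List.foldl_cons, ih, Bool.or_assoc]

-- 'kw in hl' ⟺ some position i ≤ len(hl) has kw as a prefix of hl[i:]
theorem pv_isIn_iff_startsAt (hl : List Char) (kw : String) :
    PySem.Chars.isIn kw.toList hl
      = (List.range (hl.length + 1)).any (fun i => PySem.Chars.startswith (hl.drop i) kw.toList) := by
  rcases h : PySem.Chars.isIn kw.toList hl with _ | _
  · symm
    rw [PySem.Chars.isIn_eq_false_iff] at h
    simp only [List.any_eq_false, List.mem_range]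
    intro i _ hsw
    rw [PySem.Chars.startswith_iff] at hsw
    exact h ((hsw.isInfix).trans (hl.drop_suffix i).isInfix)
  · symm
    rw [PySem.Chars.isIn_iff_infix] at h
    obtain ⟨s, t, rfl⟩ := h
    simp only [List.any_eq_true, List.mem_range]
    refine ⟨s.length, by simp, ?_⟩
    rw [PySem.Chars.startswith_iff]
    simp

-- per-category: A's any-substring test equals B's any-position test
theorem pv_cat_eq (hl : List Char) (kws : List String) :
    kws.any (fun k => PySem.Chars.isIn k.toList hl)
      = (List.range (hl.length + 1)).any (pvStartsAt hl kws) := by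
  rcases h : kws.any (fun k => PySem.Chars.isIn k.toList hl) with _ | _
  · symm
    simp only [List.any_eq_false] at h ⊢
    intro i hi hany
    simp only [pvStartsAt, List.any_eq_true] at hany
    obtain ⟨k, hk, hsw⟩ := hany
    have hx := h k hk
    rw [pv_isIn_iff_startsAt] at hx
    simp only [Bool.not_eq_true, List.any_eq_false] at hx
    simp [hx i hi] at hsw
  · symm
    simp only [List.any_eq_true] at h
    obtain ⟨k, hk, hin⟩ := h
    rw [pv_isIn_iff_startsAt] at hin
    simp only [List.any_eq_true] at hin ⊢
    obtain ⟨i, hi, hsw⟩ := hin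
    exact ⟨i, hi, by simp only [pvStartsAt, List.any_eq_true]; exact ⟨k, hk, hsw⟩⟩

-- ===== VERDICT (by name: the statement is the Claim_ definition above) =====
theorem pick_analysis_key_spec : Claim_equal_pick_analysis_key := by
  intro headline _
  unfold Spec_pick_analysis_key pick_analysis_key pick_analysis_key_alt
  simp only []
  rw [pv_fold_flags]
  simp only [Bool.false_or, PySem.Str.isIn_eq, ← pv_cat_eq, pvMarkets, pvSovereign,
    pvCommodities, pvTrade]
  rfl
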